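-- pv_equiv track=rewrite | github.com/sho-kawasaki-dd/pdf_toolbox | view/startup_splash.py | _select_icon_size
-- ===== SOURCE A (Python) =====
-- PREFERRED_SPLASH_ICON_SIZE = 256
--
-- def _select_icon_size(available_sizes: list[tuple[int, int]]) -> int:
--     """`.ico` に含まれるサイズから、256px を優先して選ぶ。"""
--     if not available_sizes:
--         return PREFERRED_SPLASH_ICON_SIZE
--
--     square_sizes = sorted({min(width, height) for width, height in available_sizes if width > 0 and height > 0})
--     if not square_sizes:
--         return PREFERRED_SPLASH_ICON_SIZE
--
--     for size in square_sizes: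
--         if size >= PREFERRED_SPLASH_ICON_SIZE:
--             return size
--     return square_sizes[-1]
-- ===== SOURCE B (Python) =====
-- PREFERRED_SPLASH_ICON_SIZE = 256
--
-- def _select_icon_size(available_sizes):
--     """Single linear pass: track the smallest square size >= 256 and the overall
--     maximum; no set, no sort."""
--     best_ge = None
--     max_all = None
--     for width, height in available_sizes:
--         if width <= 0 or height <= 0:
--             continue
--         s = min(width, height)
--         if s >= 256:
--             if best_ge is None or s < best_ge:
--                 best_ge = s
--         if max_all is None or s > max_all:
--             max_all = s
--     if best_ge is not None:
--         return best_ge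
--     if max_all is not None:
--         return max_all
--     return PREFERRED_SPLASH_ICON_SIZE
-- ===== Notes on version B (the rewrite author's own statement) =====
-- stated objective: alternative
-- what changed: Replaced the set-dedup + sort + first->=256 scan with a single linear pass that tracks the smallest square size >= 256 and the overall maximum, with the same 256 fallback.
import Mathlib
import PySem

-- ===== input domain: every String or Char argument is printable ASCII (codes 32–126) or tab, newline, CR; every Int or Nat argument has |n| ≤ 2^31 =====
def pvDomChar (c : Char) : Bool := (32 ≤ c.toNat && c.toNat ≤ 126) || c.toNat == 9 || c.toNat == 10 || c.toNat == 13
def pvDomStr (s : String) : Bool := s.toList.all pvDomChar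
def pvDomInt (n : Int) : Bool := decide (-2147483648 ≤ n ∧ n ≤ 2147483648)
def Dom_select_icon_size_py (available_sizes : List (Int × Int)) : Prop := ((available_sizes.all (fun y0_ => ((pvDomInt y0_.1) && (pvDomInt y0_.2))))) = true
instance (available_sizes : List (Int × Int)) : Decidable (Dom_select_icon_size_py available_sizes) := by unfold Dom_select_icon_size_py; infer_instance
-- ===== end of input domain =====

-- B replaces A's set-dedup + sort + scan by one linear pass tracking the smallest
-- size >= 256 and the overall maximum (objective: alternative algorithm, same result).

-- ===== PORT A =====
-- the 'for size in square_sizes' loop; the fallback '.getD 0' is unreachable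
-- (the loop is only entered with a nonempty square_sizes list)
def pyLoopA (sq : List Int) : List Int → Int
  | [] => (PySem.List.pyGet? sq (-1)).getD 0
  | s :: rest => if 256 ≤ s then s else pyLoopA sq rest

def select_icon_size_py (available_sizes : List (Int × Int)) : Int :=
  if available_sizes = [] then 256
  else
    let square_sizes :=
      PySem.List.sorted
        (PySem.Set.ofList
          ((available_sizes.filter (fun p => decide (0 < p.1) && decide (0 < p.2))).map
            (fun p => min p.1 p.2)))
        (fun x => x) false
    if square_sizes = [] then 256
    else pyLoopA square_sizes square_sizes

-- ===== PORT B =====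
-- one loop iteration of Source B: skip non-positive pairs, update (best_ge, max_all)
def stepB (acc : Option Int × Option Int) (p : Int × Int) : Option Int × Option Int :=
  if p.1 ≤ 0 ∨ p.2 ≤ 0 then acc
  else
    let s := min p.1 p.2
    let bg := match acc.1 with
      | none => if 256 ≤ s then some s else none
      | some b => if 256 ≤ s ∧ s < b then some s else some b
    let ma := match acc.2 with
      | none => some s
      | some m => if m < s then some s else some m
    (bg, ma)

def select_icon_size_py_alt (available_sizes : List (Int × Int)) : Int :=
  let st := available_sizes.foldl stepB (none, none)
  match st.1 with
  | some b => b
  | none =>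
    match st.2 with
    | some m => m
    | none => 256

-- ===== PRECONDITION & SPEC =====
def Spec_select_icon_size_py (available_sizes : List (Int × Int)) (out : Int) : Prop := out = select_icon_size_py_alt available_sizes
instance (available_sizes : List (Int × Int)) (out : Int) : Decidable (Spec_select_icon_size_py available_sizes out) := by unfold Spec_select_icon_size_py; infer_instance

-- ===== CLAIM (what is proved, stated in full; the proofs are below) =====
def Claim_equal_select_icon_size_py : Prop := ∀ (available_sizes : List (Int × Int)), Dom_select_icon_size_py available_sizes → Spec_select_icon_size_py available_sizes (select_icon_size_py available_sizes)

-- ===== LEMMAS AND PROOFS =====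

-- the list of square sizes both programs effectively work on
def mins (xs : List (Int × Int)) : List Int :=
  (xs.filter (fun p => decide (0 < p.1) && decide (0 < p.2))).map (fun p => min p.1 p.2)

-- the common result relation: r is the smallest size >= 256, else the overall max, else 256
def Sel (l : List Int) (r : Int) : Prop :=
  (r ∈ l ∧ 256 ≤ r ∧ ∀ y ∈ l, 256 ≤ y → r ≤ y) ∨
  ((∀ y ∈ l, y < 256) ∧ r ∈ l ∧ ∀ y ∈ l, y ≤ r) ∨
  (l = [] ∧ r = 256)

theorem Sel_unique (l : List Int) (r1 r2 : Int) (h1 : Sel l r1) (h2 : Sel l r2) : r1 = r2 := by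
  rcases h1 with ⟨m1, g1, min1⟩ | ⟨all1, m1, max1⟩ | ⟨e1, v1⟩ <;>
    rcases h2 with ⟨m2, g2, min2⟩ | ⟨all2, m2, max2⟩ | ⟨e2, v2⟩
  · exact le_antisymm (min1 r2 m2 g2) (min2 r1 m1 g1)
  · exact absurd g1 (by have := all2 r1 m1; omega)
  · simp [e2] at m1
  · exact absurd g2 (by have := all1 r2 m2; omega)
  · exact le_antisymm (max2 r1 m1) (max1 r2 m2)
  · simp [e2] at m1
  · simp [e1] at m2
  · simp [e1] at m2
  · omega

-- ---- B side ----

def gStep (a : Option Int) (s : Int) : Option Int :=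
  match a with
  | none => if 256 ≤ s then some s else none
  | some b => if 256 ≤ s ∧ s < b then some s else some b

def hStep (a : Option Int) (s : Int) : Option Int :=
  match a with
  | none => some s
  | some m => if m < s then some s else some m

theorem mins_cons (p : Int × Int) (xs : List (Int × Int)) :
    mins (p :: xs) = if 0 < p.1 ∧ 0 < p.2 then min p.1 p.2 :: mins xs else mins xs := by
  simp [mins, List.filter_cons]
  split_ifs <;> simp_all

theorem foldB_split (xs : List (Int × Int)) (bg ma : Option Int) :
    xs.foldl stepB (bg, ma) = ((mins xs).foldl gStep bg, (mins xs).foldl hStep ma) := by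
  induction xs generalizing bg ma with
  | nil => simp [mins]
  | cons p xs ih =>
    rw [mins_cons]
    by_cases h : 0 < p.1 ∧ 0 < p.2
    · simp only [if_pos h, List.foldl_cons]
      rw [show stepB (bg, ma) p = (gStep bg (min p.1 p.2), hStep ma (min p.1 p.2)) by
        simp [stepB, gStep, hStep]; omega]
      exact ih _ _
    · simp only [if_neg h, List.foldl_cons]
      rw [show stepB (bg, ma) p = (bg, ma) by simp [stepB]; omega]
      exact ih _ _

theorem foldG_some (l : List Int) (b : Int) (hb : 256 ≤ b) :
    ∃ v, l.foldl gStep (some b) = some v ∧ v ∈ b :: l ∧ 256 ≤ v ∧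
      ∀ y ∈ b :: l, 256 ≤ y → v ≤ y := by
  induction l generalizing b with
  | nil => exact ⟨b, rfl, by simp, hb, by simp⟩
  | cons s t ih =>
    by_cases h : 256 ≤ s ∧ s < b
    · obtain ⟨v, hv, hm, hg, hmin⟩ := ih s h.1
      refine ⟨v, by simpa [gStep, h] using hv, List.mem_cons_of_mem _ hm, hg, ?_⟩
      intro y hy hgy
      have hvs : v ≤ s := hmin s (List.mem_cons_self ..) h.1
      rcases List.mem_cons.mp hy with rfl | hy
      · omega
      · rcases List.mem_cons.mp hy with rfl | hy
        · exact hvs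
        · exact hmin y (List.mem_cons_of_mem _ hy) hgy
    · obtain ⟨v, hv, hm, hg, hmin⟩ := ih b hb
      refine ⟨v, by simpa [gStep, h] using hv, ?_, hg, ?_⟩
      · rcases List.mem_cons.mp hm with rfl | hm
        · exact List.mem_cons_self ..
        · exact List.mem_cons_of_mem _ (List.mem_cons_of_mem _ hm)
      · intro y hy hgy
        have hvb : v ≤ b := hmin b (List.mem_cons_self ..) hb
        rcases List.mem_cons.mp hy with rfl | hy
        · exact hvb
        · rcases List.mem_cons.mp hy with rfl | hy
          · have : ¬ y < b := fun hc => h ⟨hgy, hc⟩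
            omega
          · exact hmin y (List.mem_cons_of_mem _ hy) hgy

theorem foldG_none (l : List Int) :
    (l.foldl gStep none = none ∧ ∀ y ∈ l, y < 256) ∨
    (∃ v, l.foldl gStep none = some v ∧ v ∈ l ∧ 256 ≤ v ∧ ∀ y ∈ l, 256 ≤ y → v ≤ y) := by
  induction l with
  | nil => exact Or.inl ⟨rfl, by simp⟩
  | cons s t ih =>
    by_cases h : 256 ≤ s
    · obtain ⟨v, hv, hm, hg, hmin⟩ := foldG_some t s h
      exact Or.inr ⟨v, by simpa [gStep, h] using hv, hm, hg, hmin⟩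
    · rcases ih with ⟨he, hall⟩ | ⟨v, hv, hm, hg, hmin⟩
      · refine Or.inl ⟨by simpa [gStep, h] using he, ?_⟩
        intro y hy
        rcases List.mem_cons.mp hy with rfl | hy
        · omega
        · exact hall y hy
      · refine Or.inr ⟨v, by simpa [gStep, h] using hv, List.mem_cons_of_mem _ hm, hg, ?_⟩
        intro y hy hgy
        rcases List.mem_cons.mp hy with rfl | hy
        · omega
        · exact hmin y hy hgy

theorem foldH_some (l : List Int) (m : Int) :
    ∃ v, l.foldl hStep (some m) = some v ∧ v ∈ m :: l ∧ ∀ y ∈ m :: l, y ≤ v := by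
  induction l generalizing m with
  | nil => exact ⟨m, rfl, by simp, by simp⟩
  | cons s t ih =>
    by_cases h : m < s
    · obtain ⟨v, hv, hm, hmax⟩ := ih s
      refine ⟨v, by simpa [hStep, h] using hv, List.mem_cons_of_mem _ hm, ?_⟩
      intro y hy
      have hsv : s ≤ v := hmax s (List.mem_cons_self ..)
      rcases List.mem_cons.mp hy with rfl | hy
      · omega
      · rcases List.mem_cons.mp hy with rfl | hy
        · exact hsv
        · exact hmax y (List.mem_cons_of_mem _ hy)
    · obtain ⟨v, hv, hm, hmax⟩ := ih m
      refine ⟨v, by simpa [hStep, h] using hv, ?_, ?_⟩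
      · rcases List.mem_cons.mp hm with rfl | hm
        · exact List.mem_cons_self ..
        · exact List.mem_cons_of_mem _ (List.mem_cons_of_mem _ hm)
      · intro y hy
        have hmv : m ≤ v := hmax m (List.mem_cons_self ..)
        rcases List.mem_cons.mp hy with rfl | hy
        · exact hmv
        · rcases List.mem_cons.mp hy with rfl | hy
          · omega
          · exact hmax y (List.mem_cons_of_mem _ hy)

theorem foldH_none (l : List Int) :
    (l = [] ∧ l.foldl hStep none = none) ∨
    (∃ v, l.foldl hStep none = some v ∧ v ∈ l ∧ ∀ y ∈ l, y ≤ v) := by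
  cases l with
  | nil => exact Or.inl ⟨rfl, rfl⟩
  | cons s t =>
    obtain ⟨v, hv, hm, hmax⟩ := foldH_some t s
    exact Or.inr ⟨v, by simpa [hStep] using hv, hm, hmax⟩

theorem B_sel (xs : List (Int × Int)) : Sel (mins xs) (select_icon_size_py_alt xs) := by
  unfold select_icon_size_py_alt
  rw [foldB_split]
  rcases foldG_none (mins xs) with ⟨he, hall⟩ | ⟨v, hv, hm, hg, hmin⟩
  · rw [he]
    rcases foldH_none (mins xs) with ⟨hnil, he2⟩ | ⟨w, hw, hwm, hwmax⟩
    · rw [he2]; exact Or.inr (Or.inr ⟨hnil, rfl⟩)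
    · rw [hw]; exact Or.inr (Or.inl ⟨hall, hwm, hwmax⟩)
  · rw [hv]; exact Or.inl ⟨hm, hg, hmin⟩

-- ---- A side ----

theorem loopA_char (rest t : List Int) (hp : rest.Pairwise (· < ·)) :
    (∃ v, pyLoopA t rest = v ∧ v ∈ rest ∧ 256 ≤ v ∧ ∀ y ∈ rest, 256 ≤ y → v ≤ y) ∨
    ((∀ y ∈ rest, y < 256) ∧ pyLoopA t rest = (PySem.List.pyGet? t (-1)).getD 0) := by
  induction rest with
  | nil => exact Or.inr ⟨by simp, rfl⟩
  | cons s r ih =>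
    by_cases h : 256 ≤ s
    · refine Or.inl ⟨s, by simp [pyLoopA, h], List.mem_cons_self .., h, ?_⟩
      intro y hy _
      rcases List.mem_cons.mp hy with rfl | hy
      · omega
      · have := (List.pairwise_cons.mp hp).1 y hy; omega
    · rcases ih (List.pairwise_cons.mp hp).2 with ⟨v, hv, hm, hg, hmin⟩ | ⟨hall, he⟩
      · refine Or.inl ⟨v, by simpa [pyLoopA, h] using hv, List.mem_cons_of_mem _ hm, hg, ?_⟩
        intro y hy hgy
        rcases List.mem_cons.mp hy with rfl | hy
        · omega
        · exact hmin y hy hgy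
      · refine Or.inr ⟨?_, by simpa [pyLoopA, h] using he⟩
        intro y hy
        rcases List.mem_cons.mp hy with rfl | hy
        · omega
        · exact hall y hy

theorem pairwise_le_getLast (t : List Int) (h : t ≠ []) (hp : t.Pairwise (· ≤ ·)) :
    ∀ y ∈ t, y ≤ t.getLast h := by
  induction t with
  | nil => simp at h
  | cons s r ih =>
    intro y hy
    cases r with
    | nil => simp_all
    | cons a b =>
      rcases List.mem_cons.mp hy with rfl | hy
      · have h1 := (List.pairwise_cons.mp hp).1
        have h2 := ih (by simp) (List.pairwise_cons.mp hp).2 a (List.mem_cons_self ..)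
        rw [List.getLast_cons (by simp)]
        exact le_trans (h1 a (List.mem_cons_self ..)) h2
      · rw [List.getLast_cons (by simp)]
        exact ih (by simp) (List.pairwise_cons.mp hp).2 y hy

theorem A_sel (xs : List (Int × Int)) : Sel (mins xs) (select_icon_size_py xs) := by
  unfold select_icon_size_py
  by_cases hx : xs = []
  · subst hx; exact Or.inr (Or.inr ⟨rfl, by simp⟩)
  · simp only [if_neg hx]
    rw [show ((xs.filter (fun p => decide (0 < p.1) && decide (0 < p.2))).map
      (fun p => min p.1 p.2)) = mins xs from rfl]
    set t := PySem.List.sorted (PySem.Set.ofList (mins xs)) (fun x => x) false with ht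
    have hmem : ∀ y : Int, y ∈ t ↔ y ∈ mins xs := by
      intro y
      rw [ht, PySem.List.mem_sorted, PySem.Set.mem_ofList]
    have hlt : t.Pairwise (· < ·) := by
      rw [ht]; exact PySem.List.sorted_ofList_pairwise_lt (mins xs)
    by_cases hte : t = []
    · have hmn : mins xs = [] := by
        cases hmn : mins xs with
        | nil => rfl
        | cons a b =>
          have : a ∈ t := (hmem a).mpr (by simp [hmn])
          simp [hte] at this
      simp only [if_pos hte]
      exact Or.inr (Or.inr ⟨hmn, rfl⟩)
    · simp only [if_neg hte]
      rcases loopA_char t t hlt with ⟨v, hv, hm, hg, hmin⟩ | ⟨hall, he⟩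
      · rw [hv]
        refine Or.inl ⟨(hmem v).mp hm, hg, ?_⟩
        intro y hy hgy; exact hmin y ((hmem y).mpr hy) hgy
      · rw [he, PySem.List.pyGet?_neg_one, List.getLast?_eq_some_getLast hte]
        refine Or.inr (Or.inl ⟨?_, ?_, ?_⟩)
        · intro y hy; exact hall y ((hmem y).mpr hy)
        · exact (hmem _).mp (List.getLast_mem hte)
        · intro y hy
          exact pairwise_le_getLast t hte (hlt.imp le_of_lt) y ((hmem y).mpr hy)

-- ===== VERDICT (by name: the statement is the Claim_ definition above) =====
theorem select_icon_size_py_spec : Claim_equal_select_icon_size_py := by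
  intro xs _
  unfold Spec_select_icon_size_py
  exact Sel_unique (mins xs) _ _ (A_sel xs) (B_sel xs)
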